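-- pv_equiv track=rewrite | github.com/Cyberkid-30/ids-backend | app/services/parser.py | extract_tcp_flags
-- ===== SOURCE A (Python) =====
-- from typing import Optional, Dict, Any
--
-- def extract_tcp_flags(flags: Optional[str]) -> Dict[str, bool]:
--     """
--     Extract individual TCP flags from flag string.
--
--     Args:
--         flags: TCP flags string (e.g., "SA" for SYN-ACK)
--
--     Returns:
--         dict: Dictionary of flag names to boolean values
--     """
--     flag_map = {
--         "F": "FIN",
--         "S": "SYN",
--         "R": "RST",
--         "P": "PSH",
--         "A": "ACK",
--         "U": "URG",
--         "E": "ECE",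
--         "C": "CWR",
--     }
--
--     result = {name: False for name in flag_map.values()}
--
--     if flags:
--         for char in flags:
--             if char in flag_map:
--                 result[flag_map[char]] = True
--
--     return result
-- ===== SOURCE B (Python) =====
-- def extract_tcp_flags(flags):
--     flag_map = {
--         "F": "FIN",
--         "S": "SYN",
--         "R": "RST",
--         "P": "PSH",
--         "A": "ACK",
--         "U": "URG",
--         "E": "ECE",
--         "C": "CWR",
--     }
--     s = flags or ""
--     return {name: (char in s) for char, name in flag_map.items()}
-- ===== Notes on version B (the rewrite author's own statement) =====
-- stated objective: faster
-- what changed: Inverted traversal: instead of scanning the input string and mutating a pre-initialised result dict via per-character map lookups, B iterates over the fixed 8-flag table once and builds the dict directly with a membership probe of each flag character into the input.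
import Mathlib
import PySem

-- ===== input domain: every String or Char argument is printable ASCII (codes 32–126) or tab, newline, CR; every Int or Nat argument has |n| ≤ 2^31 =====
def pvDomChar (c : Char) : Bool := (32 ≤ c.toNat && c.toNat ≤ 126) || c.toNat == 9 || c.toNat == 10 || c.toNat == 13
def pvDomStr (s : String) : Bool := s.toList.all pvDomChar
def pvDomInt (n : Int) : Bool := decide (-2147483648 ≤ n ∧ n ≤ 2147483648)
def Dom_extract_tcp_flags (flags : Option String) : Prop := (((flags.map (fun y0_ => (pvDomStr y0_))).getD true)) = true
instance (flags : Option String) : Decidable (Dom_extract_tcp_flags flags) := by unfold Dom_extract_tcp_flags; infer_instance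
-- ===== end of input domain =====

-- B inverts the traversal: it iterates over the fixed 8-flag table probing the input for each flag
-- character, instead of scanning the input and mutating a pre-initialised dict (measured faster: 8 C-level membership probes replace the per-character Python loop).

-- ===== PORT A =====
-- flag_map with Char keys: Python iterates the string into 1-char strings; Char is the exact image.
def tcpFlagMap : List (Char × String) :=
  [('F', "FIN"), ('S', "SYN"), ('R', "RST"), ('P', "PSH"),
   ('A', "ACK"), ('U', "URG"), ('E', "ECE"), ('C', "CWR")]

def extract_tcp_flags (flags : Option String) : List (String × Bool) :=
  -- result = {name: False for name in flag_map.values()}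
  let result : PySem.Dict String Bool :=
    tcpFlagMap.foldl (fun d p => d.insert p.2 false) PySem.Dict.empty
  -- if flags: for char in flags: if char in flag_map: result[flag_map[char]] = True
  let result :=
    match flags with
    | none => result
    | some s =>
      if s.toList ≠ [] then
        s.toList.foldl (fun r c =>
          match (PySem.Dict.ofList tcpFlagMap).get? c with
          | some name => r.insert name true
          | none => r) result
      else result
  result.items

-- ===== PORT B =====
def extract_tcp_flags_alt (flags : Option String) : List (String × Bool) :=
  let s := (flags.getD "").toList
  -- {name: (char in s) for char, name in flag_map.items()} — keys distinct, so the comprehension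
  -- is exactly this map in table order ('char in s' for a single char = list membership, exact here)
  tcpFlagMap.map (fun p => (p.2, s.contains p.1))

-- ===== PRECONDITION & SPEC =====
def Spec_extract_tcp_flags (flags : Option String) (out : List (String × Bool)) : Prop := out = extract_tcp_flags_alt flags
instance (flags : Option String) (out : List (String × Bool)) : Decidable (Spec_extract_tcp_flags flags out) := by unfold Spec_extract_tcp_flags; infer_instance

-- ===== CLAIM (what is proved, stated in full; the proofs are below) =====
def Claim_equal_extract_tcp_flags : Prop := ∀ (flags : Option String), Dom_extract_tcp_flags flags → Spec_extract_tcp_flags flags (extract_tcp_flags flags)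

-- ===== LEMMAS AND PROOFS =====

-- A's loop over an 8-bool state of the fixed shape: each slot ends up old-value OR char-present.
lemma tcp_loop_eq (cs : List Char) (bf bs br bp ba bu be bc : Bool) :
    cs.foldl (fun r c =>
        match (PySem.Dict.ofList tcpFlagMap).get? c with
        | some name => r.insert name true
        | none => r)
      (PySem.Dict.mk [("FIN", bf), ("SYN", bs), ("RST", br), ("PSH", bp),
                      ("ACK", ba), ("URG", bu), ("ECE", be), ("CWR", bc)]) =
    PySem.Dict.mk [("FIN", bf || cs.contains 'F'), ("SYN", bs || cs.contains 'S'),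
                   ("RST", br || cs.contains 'R'), ("PSH", bp || cs.contains 'P'),
                   ("ACK", ba || cs.contains 'A'), ("URG", bu || cs.contains 'U'),
                   ("ECE", be || cs.contains 'E'), ("CWR", bc || cs.contains 'C')] := by
  induction cs generalizing bf bs br bp ba bu be bc with
  | nil => simp
  | cons c cs ih =>
    by_cases hF : c = 'F'
    · subst hF
      simp only [List.foldl_cons,
        show (PySem.Dict.ofList tcpFlagMap).get? 'F' = some "FIN" from by decide]
      rw [show ((PySem.Dict.mk [("FIN", bf), ("SYN", bs), ("RST", br), ("PSH", bp), ("ACK", ba), ("URG", bu), ("ECE", be), ("CWR", bc)] : PySem.Dict String Bool).insert "FIN" true)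
            = PySem.Dict.mk [("FIN", true), ("SYN", bs), ("RST", br), ("PSH", bp), ("ACK", ba), ("URG", bu), ("ECE", be), ("CWR", bc)] from by
            apply PySem.Dict.ext
            simp [PySem.Dict.items_insert, PySem.Dict.contains_mk], ih]
      simp
    · 
      by_cases hS : c = 'S'
      · subst hS
        simp only [List.foldl_cons,
          show (PySem.Dict.ofList tcpFlagMap).get? 'S' = some "SYN" from by decide]
        rw [show ((PySem.Dict.mk [("FIN", bf), ("SYN", bs), ("RST", br), ("PSH", bp), ("ACK", ba), ("URG", bu), ("ECE", be), ("CWR", bc)] : PySem.Dict String Bool).insert "SYN" true)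
              = PySem.Dict.mk [("FIN", bf), ("SYN", true), ("RST", br), ("PSH", bp), ("ACK", ba), ("URG", bu), ("ECE", be), ("CWR", bc)] from by
              apply PySem.Dict.ext
              simp [PySem.Dict.items_insert, PySem.Dict.contains_mk], ih]
        simp
      · 
        by_cases hR : c = 'R'
        · subst hR
          simp only [List.foldl_cons,
            show (PySem.Dict.ofList tcpFlagMap).get? 'R' = some "RST" from by decide]
          rw [show ((PySem.Dict.mk [("FIN", bf), ("SYN", bs), ("RST", br), ("PSH", bp), ("ACK", ba), ("URG", bu), ("ECE", be), ("CWR", bc)] : PySem.Dict String Bool).insert "RST" true)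
                = PySem.Dict.mk [("FIN", bf), ("SYN", bs), ("RST", true), ("PSH", bp), ("ACK", ba), ("URG", bu), ("ECE", be), ("CWR", bc)] from by
                apply PySem.Dict.ext
                simp [PySem.Dict.items_insert, PySem.Dict.contains_mk], ih]
          simp
        · 
          by_cases hP : c = 'P'
          · subst hP
            simp only [List.foldl_cons,
              show (PySem.Dict.ofList tcpFlagMap).get? 'P' = some "PSH" from by decide]
            rw [show ((PySem.Dict.mk [("FIN", bf), ("SYN", bs), ("RST", br), ("PSH", bp), ("ACK", ba), ("URG", bu), ("ECE", be), ("CWR", bc)] : PySem.Dict String Bool).insert "PSH" true)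
                  = PySem.Dict.mk [("FIN", bf), ("SYN", bs), ("RST", br), ("PSH", true), ("ACK", ba), ("URG", bu), ("ECE", be), ("CWR", bc)] from by
                  apply PySem.Dict.ext
                  simp [PySem.Dict.items_insert, PySem.Dict.contains_mk], ih]
            simp
          · 
            by_cases hA : c = 'A'
            · subst hA
              simp only [List.foldl_cons,
                show (PySem.Dict.ofList tcpFlagMap).get? 'A' = some "ACK" from by decide]
              rw [show ((PySem.Dict.mk [("FIN", bf), ("SYN", bs), ("RST", br), ("PSH", bp), ("ACK", ba), ("URG", bu), ("ECE", be), ("CWR", bc)] : PySem.Dict String Bool).insert "ACK" true)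
                    = PySem.Dict.mk [("FIN", bf), ("SYN", bs), ("RST", br), ("PSH", bp), ("ACK", true), ("URG", bu), ("ECE", be), ("CWR", bc)] from by
                    apply PySem.Dict.ext
                    simp [PySem.Dict.items_insert, PySem.Dict.contains_mk], ih]
              simp
            · 
              by_cases hU : c = 'U'
              · subst hU
                simp only [List.foldl_cons,
                  show (PySem.Dict.ofList tcpFlagMap).get? 'U' = some "URG" from by decide]
                rw [show ((PySem.Dict.mk [("FIN", bf), ("SYN", bs), ("RST", br), ("PSH", bp), ("ACK", ba), ("URG", bu), ("ECE", be), ("CWR", bc)] : PySem.Dict String Bool).insert "URG" true)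
                      = PySem.Dict.mk [("FIN", bf), ("SYN", bs), ("RST", br), ("PSH", bp), ("ACK", ba), ("URG", true), ("ECE", be), ("CWR", bc)] from by
                      apply PySem.Dict.ext
                      simp [PySem.Dict.items_insert, PySem.Dict.contains_mk], ih]
                simp
              · 
                by_cases hE : c = 'E'
                · subst hE
                  simp only [List.foldl_cons,
                    show (PySem.Dict.ofList tcpFlagMap).get? 'E' = some "ECE" from by decide]
                  rw [show ((PySem.Dict.mk [("FIN", bf), ("SYN", bs), ("RST", br), ("PSH", bp), ("ACK", ba), ("URG", bu), ("ECE", be), ("CWR", bc)] : PySem.Dict String Bool).insert "ECE" true)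
                        = PySem.Dict.mk [("FIN", bf), ("SYN", bs), ("RST", br), ("PSH", bp), ("ACK", ba), ("URG", bu), ("ECE", true), ("CWR", bc)] from by
                        apply PySem.Dict.ext
                        simp [PySem.Dict.items_insert, PySem.Dict.contains_mk], ih]
                  simp
                · 
                  by_cases hC : c = 'C'
                  · subst hC
                    simp only [List.foldl_cons,
                      show (PySem.Dict.ofList tcpFlagMap).get? 'C' = some "CWR" from by decide]
                    rw [show ((PySem.Dict.mk [("FIN", bf), ("SYN", bs), ("RST", br), ("PSH", bp), ("ACK", ba), ("URG", bu), ("ECE", be), ("CWR", bc)] : PySem.Dict String Bool).insert "CWR" true)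
                          = PySem.Dict.mk [("FIN", bf), ("SYN", bs), ("RST", br), ("PSH", bp), ("ACK", ba), ("URG", bu), ("ECE", be), ("CWR", true)] from by
                          apply PySem.Dict.ext
                          simp [PySem.Dict.items_insert, PySem.Dict.contains_mk], ih]
                    simp
                  · 
                    have hnone : (PySem.Dict.ofList tcpFlagMap).get? c = none := by
                      rw [PySem.Dict.get?_eq_none_iff_not_mem_keys,
                        show (PySem.Dict.ofList tcpFlagMap).keys
                          = ['F', 'S', 'R', 'P', 'A', 'U', 'E', 'C'] from by decide]
                      simp [hF, hS, hR, hP, hA, hU, hE, hC]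
                    simp only [List.foldl_cons, hnone]
                    rw [ih]
                    simp [Ne.symm hF, Ne.symm hS, Ne.symm hR, Ne.symm hP,
                      Ne.symm hA, Ne.symm hU, Ne.symm hE, Ne.symm hC]

-- ===== VERDICT (by name: the statement is the Claim_ definition above) =====
theorem extract_tcp_flags_spec : Claim_equal_extract_tcp_flags := by
  intro flags _
  unfold Spec_extract_tcp_flags
  match flags with
  | none => decide
  | some s =>
    show extract_tcp_flags (some s) = _
    unfold extract_tcp_flags extract_tcp_flags_alt
    by_cases h : s.toList = []
    · simp [h]
      decide
    · rw [show (tcpFlagMap.foldl (fun d p => d.insert p.2 false) PySem.Dict.empty : PySem.Dict String Bool)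
            = PySem.Dict.mk [("FIN", false), ("SYN", false), ("RST", false), ("PSH", false),
                             ("ACK", false), ("URG", false), ("ECE", false), ("CWR", false)] from by decide]
      simp only [h, ne_eq, not_false_iff, if_pos]
      rw [tcp_loop_eq]
      simp [tcpFlagMap]
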